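-- pv_equiv track=rewrite | github.com/leihchen/leetcode | mac/main.py | memorySegment
-- ===== SOURCE A (Python) =====
-- def memorySegment(nums=[10,4,8,13,20], k=2):
--     sum_ = 0
--     for i in range(k):
--         sum_ += nums[i]
--     res = sum_
--     for i in range(k, len(nums)):
--         sum_ += nums[i] - nums[i-k]
--         res = max(res, sum_)
--     return sum(nums) - res
-- ===== SOURCE B (Python) =====
-- def memorySegment(nums=[10,4,8,13,20], k=2):
--     pre = [0]
--     for x in nums:
--         pre.append(pre[-1] + x)
--     best = max(pre[i + k] - pre[i] for i in range(len(nums) - k + 1))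
--     return pre[-1] - best
-- ===== Notes on version B (the rewrite author's own statement) =====
-- stated objective: alternative
-- what changed: Replaces the incremental running-window update (seed loop plus sliding delta loop) with a prefix-sum table built once and a single max over window differences pre[i+k]-pre[i].
import Mathlib
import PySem

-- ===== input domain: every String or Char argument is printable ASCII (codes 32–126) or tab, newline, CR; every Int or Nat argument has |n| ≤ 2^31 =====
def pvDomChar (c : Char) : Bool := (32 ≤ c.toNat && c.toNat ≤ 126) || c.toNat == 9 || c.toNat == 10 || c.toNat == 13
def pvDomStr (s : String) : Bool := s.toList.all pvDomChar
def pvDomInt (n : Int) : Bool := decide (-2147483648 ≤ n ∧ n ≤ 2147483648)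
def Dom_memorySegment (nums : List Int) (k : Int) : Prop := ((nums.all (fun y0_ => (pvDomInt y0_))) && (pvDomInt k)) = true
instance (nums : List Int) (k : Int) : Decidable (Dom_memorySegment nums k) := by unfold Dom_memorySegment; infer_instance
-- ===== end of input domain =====

-- B replaces A's seed-then-slide running window with a prefix-sum table and one max
-- over window differences; same O(n) cost, different decomposition (alternative).

-- ===== PORT A =====
def memorySegment (nums : List Int) (k : Int) : Int :=
  let sum0 : Int := (PySem.List.pyRange 0 k 1).foldl
    (fun s i => s + PySem.List.pyGetD nums i 0) 0
  let p := (PySem.List.pyRange k (nums.length : Int) 1).foldl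
    (fun (sr : Int × Int) i =>
      let s := sr.1 + PySem.List.pyGetD nums i 0 - PySem.List.pyGetD nums (i - k) 0
      (s, max sr.2 s)) (sum0, sum0)
  nums.sum - p.2

-- ===== PORT B =====
def memorySegment_alt (nums : List Int) (k : Int) : Int :=
  let pre := nums.foldl (fun p x => p ++ [PySem.List.pyGetD p (-1) 0 + x]) ([0] : List Int)
  let ws := (PySem.List.pyRange 0 ((nums.length : Int) - k + 1) 1).map
    (fun i => PySem.List.pyGetD pre (i + k) 0 - PySem.List.pyGetD pre i 0)
  match PySem.List.max? ws (fun y => y) with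
  | some m => PySem.List.pyGetD pre (-1) 0 - m
  | none => 0   -- unreachable under Pre_ (Python's max([]) raises ValueError)

-- ===== PRECONDITION & SPEC =====
-- Pre_ is exactly where Python A returns: for k < 0 the slide loop reads nums[i-k]
-- past the end (IndexError), for k > len(nums) the seed loop does (IndexError).
def Pre_memorySegment (nums : List Int) (k : Int) : Prop :=
  0 ≤ k ∧ k ≤ (nums.length : Int)
instance (nums : List Int) (k : Int) : Decidable (Pre_memorySegment nums k) := by
  unfold Pre_memorySegment; infer_instance
def pvWitness_memorySegment : List Int × Int := ([10, 4, 8, 13, 20], 2)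

def Spec_memorySegment (nums : List Int) (k : Int) (out : Int) : Prop :=
  out = memorySegment_alt nums k
instance (nums : List Int) (k : Int) (out : Int) : Decidable (Spec_memorySegment nums k out) := by
  unfold Spec_memorySegment; infer_instance

-- ===== CLAIM (what is proved, stated in full; the proofs are below) =====
def Claim_equal_memorySegment : Prop := ∀ (nums : List Int) (k : Int),
  Dom_memorySegment nums k → Pre_memorySegment nums k →
  Spec_memorySegment nums k (memorySegment nums k)

-- ===== LEMMAS AND PROOFS =====

-- prefix sum nums[0]+…+nums[i-1]
def pvS (nums : List Int) (i : Nat) : Int := (nums.take i).sum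
-- the size-kn window sum starting at j
def pvW (nums : List Int) (kn j : Nat) : Int := pvS nums (j + kn) - pvS nums j
-- scan of running sums starting from s
def pvScan (s : Int) : List Int → List Int
  | [] => []
  | x :: xs => (s + x) :: pvScan (s + x) xs

theorem pvS_succ (nums : List Int) (i : Nat) (h : i < nums.length) :
    pvS nums (i + 1) = pvS nums i + nums[i] :=
  List.sum_take_succ nums i h

theorem pvScan_get (l : List Int) : ∀ (s : Int) (i : Nat), i < l.length →
    (pvScan s l)[i]? = some (s + pvS l (i + 1)) := by
  induction l with
  | nil => intro s i h; simp at h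
  | cons x xs ih =>
    intro s i h
    cases i with
    | zero => simp [pvScan, pvS]
    | succ j =>
      have hj : j < xs.length := by simpa using h
      have := ih (s + x) j hj
      simp [pvScan, this, pvS, add_assoc]

theorem pvScan_getLast (l : List Int) : ∀ s, l ≠ [] →
    (pvScan s l).getLast? = some (s + l.sum) := by
  induction l with
  | nil => intro s h; exact absurd rfl h
  | cons x xs ih =>
    intro s _
    cases xs with
    | nil => simp [pvScan]
    | cons y ys =>
      have := ih (s + x) (by simp)
      simp only [pvScan]
      rw [List.getLast?_cons_cons] at *
      simp [pvScan] at this ⊢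
      rw [this]; ring_nf

-- B's pre list is [0] followed by the running sums
theorem pvPre_eq (nums : List Int) : ∀ (p : List Int) (hp : p ≠ []),
    nums.foldl (fun p x => p ++ [PySem.List.pyGetD p (-1) 0 + x]) p
      = p ++ pvScan (p.getLast hp) nums := by
  induction nums with
  | nil => intro p hp; simp [pvScan]
  | cons x xs ih =>
    intro p hp
    have hstep : PySem.List.pyGetD p (-1) 0 = p.getLast hp :=
      PySem.List.pyGetD_neg_one p 0 hp
    simp only [List.foldl_cons, hstep]
    rw [ih (p ++ [p.getLast hp + x]) (by simp)]
    have : (p ++ [p.getLast hp + x]).getLast (by simp) = p.getLast hp + x := by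
      simp
    rw [this]
    simp [pvScan]

-- the seed loop computes the first window sum
theorem pvLoopA1 (nums : List Int) (kn : Nat) (hk : kn ≤ nums.length) :
    (PySem.List.pyRange 0 (kn : Int) 1).foldl
        (fun s i => s + PySem.List.pyGetD nums i 0) 0 = pvS nums kn := by
  induction kn with
  | zero => simp [PySem.List.pyRange_one_eq_nil, pvS]
  | succ m ih =>
    have hm : m ≤ nums.length := Nat.le_of_succ_le hk
    have hlt : m < nums.length := hk
    rw [show ((m + 1 : Nat) : Int) = (m : Int) + 1 by push_cast; ring,
        PySem.List.pyRange_one_succ_right (by positivity), List.foldl_append]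
    simp only [List.foldl_cons, List.foldl_nil]
    rw [ih hm]
    have : PySem.List.pyGetD nums (m : Int) 0 = nums[m] := by
      rw [PySem.List.pyGetD_natCast]
      simp [List.getD, List.getElem?_eq_getElem hlt]
    rw [this, pvS_succ nums m hlt]

-- the slide loop: after the whole range, sum_ is the last window and res the running max
theorem pvLoopA2 (nums : List Int) (kn : Nat)
    (m : Nat) (hm : kn + m ≤ nums.length) (r0 : Int) :
    ((List.range m).map (fun (j : Nat) => (kn : Int) + (j : Int))).foldl
        (fun (sr : Int × Int) i =>
          let s := sr.1 + PySem.List.pyGetD nums i 0 - PySem.List.pyGetD nums (i - kn) 0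
          (s, max sr.2 s)) (pvW nums kn 0, r0)
      = (pvW nums kn m,
         ((List.range m).map (fun j => pvW nums kn (j + 1))).foldl max r0) := by
  induction m generalizing r0 with
  | zero => simp
  | succ p ih =>
    have hp : kn + p ≤ nums.length := by omega
    simp only [List.range_succ, List.map_append, List.foldl_append]
    rw [ih hp]
    have h1 : kn + p < nums.length := by omega
    have h2 : p < nums.length := by omega
    have g1 : PySem.List.pyGetD nums ((kn : Int) + p) 0 = nums[kn + p] := by
      rw [show ((kn : Int) + p) = ((kn + p : Nat) : Int) by push_cast; ring,
        PySem.List.pyGetD_natCast]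
      simp [List.getD, List.getElem?_eq_getElem h1]
    have g2 : PySem.List.pyGetD nums ((kn : Int) + p - kn) 0 = nums[p] := by
      rw [show ((kn : Int) + p - kn) = ((p : Nat) : Int) by ring,
        PySem.List.pyGetD_natCast]
      simp [List.getD, List.getElem?_eq_getElem h2]
    have hw : pvW nums kn p + nums[kn + p] - nums[p] = pvW nums kn (p + 1) := by
      unfold pvW
      rw [show p + 1 + kn = (p + kn) + 1 by ring, pvS_succ nums (p + kn) (by omega),
          pvS_succ nums p h2]
      have : nums[p + kn] = nums[kn + p] := by congr 1; ring
      rw [this]; ring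
    simp only [List.map_cons, List.map_nil, List.foldl_cons, List.foldl_nil, g1, g2]
    rw [hw]

theorem pvGetD_pre (nums : List Int) (i : Nat) (hi : i ≤ nums.length) :
    PySem.List.pyGetD (0 :: pvScan 0 nums) (i : Int) 0 = pvS nums i := by
  rw [PySem.List.pyGetD_natCast]
  cases i with
  | zero => simp [List.getD, pvS]
  | succ j =>
    have hj : j < nums.length := hi
    simp only [List.getD, List.getElem?_cons_succ]
    rw [pvScan_get nums 0 j hj]
    simp

-- ===== VERDICT (by name: the statement is the Claim_ definition above) =====
theorem memorySegment_spec : Claim_equal_memorySegment := by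
  intro nums k _ hpre
  obtain ⟨hk0, hkn⟩ := hpre
  unfold Spec_memorySegment
  simp only [memorySegment, memorySegment_alt]
  set kn := k.toNat with hknat
  have hkcast : (kn : Int) = k := Int.toNat_of_nonneg hk0
  have hkle : kn ≤ nums.length := by omega
  set n := nums.length with hn
  -- B's pre list
  have hpre_eq : nums.foldl (fun p x => p ++ [PySem.List.pyGetD p (-1) 0 + x]) ([0] : List Int)
      = 0 :: pvScan 0 nums := by
    rw [pvPre_eq nums [0] (by simp)]; simp
  rw [hpre_eq]
  -- A's seed loop
  rw [← hkcast, pvLoopA1 nums kn hkle]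
  -- A's slide loop: convert pyRange to mapped List.range
  have hrange : PySem.List.pyRange (kn : Int) (n : Int) 1
      = (List.range (n - kn)).map (fun (j : Nat) => (kn : Int) + (j : Int)) := by
    have htn : ((n : Int) - (kn : Int)).toNat = n - kn := by omega
    rw [PySem.List.pyRange_one, htn]
  have hW0 : pvS nums kn = pvW nums kn 0 := by simp [pvW, pvS]
  rw [hrange, hW0, pvLoopA2 nums kn (n - kn) (by omega) (pvW nums kn 0)]
  -- B's window list
  have hm : (n : Int) - (kn : Int) + 1 = ((n - kn + 1 : Nat) : Int) := by push_cast; omega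
  have hws : (PySem.List.pyRange 0 ((n : Int) - (kn : Int) + 1) 1).map
      (fun i => PySem.List.pyGetD (0 :: pvScan 0 nums) (i + (kn : Int)) 0
        - PySem.List.pyGetD (0 :: pvScan 0 nums) i 0)
      = (List.range (n - kn + 1)).map (fun j => pvW nums kn j) := by
    rw [hm, PySem.List.pyRange_one]
    simp only [sub_zero, Int.toNat_natCast, List.map_map]
    apply List.map_congr_left
    intro j hj
    have hj' : j < n - kn + 1 := List.mem_range.mp hj
    simp only [Function.comp_apply, zero_add]
    rw [show (j : Int) + (kn : Int) = ((j + kn : Nat) : Int) by push_cast; ring]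
    rw [pvGetD_pre nums (j + kn) (by omega), pvGetD_pre nums j (by omega)]
    rfl
  rw [hws]
  -- B's max over the nonempty window list
  have hsplit : (List.range (n - kn + 1)).map (fun j => pvW nums kn j)
      = pvW nums kn 0 :: (List.range (n - kn)).map (fun j => pvW nums kn (j + 1)) := by
    rw [List.range_succ_eq_map]
    simp [List.map_map, Function.comp]
  rw [hsplit, PySem.List.max?_id_cons]
  -- B's pre[-1]
  have hlast : PySem.List.pyGetD (0 :: pvScan 0 nums) (-1) 0 = nums.sum := by
    cases nums with
    | nil => simp [pvScan, PySem.List.pyGetD_neg_one ([0] : List Int) 0 (by simp)]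
    | cons x xs =>
      have hne : pvScan 0 (x :: xs) ≠ [] := by simp [pvScan]
      have h1 : (0 :: pvScan 0 (x :: xs)).getLast (by simp) =
          (pvScan 0 (x :: xs)).getLast hne := List.getLast_cons hne
      rw [PySem.List.pyGetD_neg_one _ 0 (by simp), h1]
      have h2 := pvScan_getLast (x :: xs) 0 (by simp)
      rw [List.getLast?_eq_some_getLast hne] at h2
      have h3 := Option.some.inj h2
      simpa using h3
  rw [hlast]
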